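-- pv_equiv track=rewrite | github.com/oldnordic/kwecli | agents/design/ui_designer_simple.py | _analyze_design_needs
-- ===== SOURCE A (Python) =====
-- from typing import Dict, List, Any
--
-- def _analyze_design_needs(task: str) -> List[str]:
--     """Analyze task to determine appropriate design methods."""
--     task_lower = task.lower()
--     methods = []
--
--     if any(word in task_lower for word in ["component", "system"]):
--         methods.append("design_system")
--
--     if any(word in task_lower for word in ["interface", "screen", "page"]):
--         methods.append("interface_design")
--
--     if any(word in task_lower for word in ["color", "palette", "theme"]):
--         methods.append("color_system")
--
--     if any(word in task_lower for word in ["typography", "font", "text"]):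
--         methods.append("typography_design")
--
--     return methods if methods else ["comprehensive_ui_design"]
-- ===== SOURCE B (Python) =====
-- def _analyze_design_needs(task: str) -> list:
--     """Analyze task to determine appropriate design methods.
--
--     Single left-to-right scan over the lowered text: at each position, test
--     for each not-yet-found category whether one of its keywords starts there
--     (str.startswith with an offset), instead of running a separate substring
--     search per keyword with `in`.
--     """
--     groups = [
--         (("component", "system"), "design_system"),
--         (("interface", "screen", "page"), "interface_design"),
--         (("color", "palette", "theme"), "color_system"),
--         (("typography", "font", "text"), "typography_design"),
--     ]
--     t = task.lower()
--     found = [False, False, False, False]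
--     for i in range(len(t)):
--         for g in range(4):
--             if not found[g] and any(t.startswith(w, i) for w in groups[g][0]):
--                 found[g] = True
--     methods = [groups[g][1] for g in range(4) if found[g]]
--     return methods if methods else ["comprehensive_ui_design"]
-- ===== Notes on version B (the rewrite author's own statement) =====
-- stated objective: alternative
-- what changed: B replaces A's per-keyword substring-membership tests with one left-to-right scan of the lowered text that, at each position, marks any not-yet-found category whose keyword starts there (startswith with an offset) in a found-flags array, then maps the flags to method names.
import Mathlib
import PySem

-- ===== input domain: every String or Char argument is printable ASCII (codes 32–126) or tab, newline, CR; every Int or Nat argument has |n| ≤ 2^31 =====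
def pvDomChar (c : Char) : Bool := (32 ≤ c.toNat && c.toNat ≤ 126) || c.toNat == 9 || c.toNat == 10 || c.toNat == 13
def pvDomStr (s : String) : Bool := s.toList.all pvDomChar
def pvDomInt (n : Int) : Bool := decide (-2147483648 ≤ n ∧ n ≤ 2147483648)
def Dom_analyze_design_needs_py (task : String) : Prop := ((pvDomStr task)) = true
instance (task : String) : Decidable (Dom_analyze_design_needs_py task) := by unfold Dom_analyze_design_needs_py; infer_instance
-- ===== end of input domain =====

-- B replaces A's per-keyword `in` substring searches with one left-to-right scan of the
-- lowered text marking not-yet-found categories whose keyword starts at the current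
-- position (objective: alternative).

-- ===== PORT A =====
def analyze_design_needs_py (task : String) : List String :=
  let task_lower := PySem.Str.lower task
  let methods : List String := []
  let methods := if (["component", "system"].any (fun w => PySem.Str.isIn w task_lower)) then methods ++ ["design_system"] else methods
  let methods := if (["interface", "screen", "page"].any (fun w => PySem.Str.isIn w task_lower)) then methods ++ ["interface_design"] else methods
  let methods := if (["color", "palette", "theme"].any (fun w => PySem.Str.isIn w task_lower)) then methods ++ ["color_system"] else methods
  let methods := if (["typography", "font", "text"].any (fun w => PySem.Str.isIn w task_lower)) then methods ++ ["typography_design"] else methods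
  if methods ≠ [] then methods else ["comprehensive_ui_design"]

-- ===== PORT B =====
def pvGroups : List (List String × String) :=
  [ (["component", "system"], "design_system")
  , (["interface", "screen", "page"], "interface_design")
  , (["color", "palette", "theme"], "color_system")
  , (["typography", "font", "text"], "typography_design") ]

-- Python `t.startswith(w, i)` with 0 ≤ i is exactly "w is a prefix of t[i:]":
-- ported as PySem.Chars.startswith on the dropped char list (exact).
def analyze_design_needs_py_alt (task : String) : List String :=
  let t := (PySem.Str.lower task).toList
  let found : List Bool := [false, false, false, false]
  let found := (List.range t.length).foldl (fun found i =>
    (List.range 4).foldl (fun fd g =>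
      if !(fd.getD g false) &&
          ((pvGroups.getD g ([], "")).1.any (fun w => PySem.Chars.startswith (t.drop i) w.toList))
      then fd.set g true else fd) found) found
  let methods := (List.range 4).filterMap (fun g =>
    if found.getD g false then some ((pvGroups.getD g ([], "")).2) else none)
  if methods ≠ [] then methods else ["comprehensive_ui_design"]

-- ===== PRECONDITION & SPEC =====
def Spec_analyze_design_needs_py (task : String) (out : List String) : Prop := out = analyze_design_needs_py_alt task
instance (task : String) (out : List String) : Decidable (Spec_analyze_design_needs_py task out) := by unfold Spec_analyze_design_needs_py; infer_instance

-- ===== CLAIM (what is proved, stated in full; the proofs are below) =====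
def Claim_equal_analyze_design_needs_py : Prop := ∀ (task : String), Dom_analyze_design_needs_py task → Spec_analyze_design_needs_py task (analyze_design_needs_py task)

-- ===== LEMMAS AND PROOFS =====

-- one pass of the inner loop over the four groups, on a 4-element flag list
theorem pv_step4 (cond : Nat → Bool) (a b c d : Bool) :
    (List.range 4).foldl (fun fd g => if !(fd.getD g false) && cond g then fd.set g true else fd) [a, b, c, d]
      = [a || cond 0, b || cond 1, c || cond 2, d || cond 3] := by
  have h4 : List.range 4 = [0, 1, 2, 3] := by decide
  rw [h4]
  simp only [List.foldl]
  generalize cond 0 = e0; generalize cond 1 = e1; generalize cond 2 = e2; generalize cond 3 = e3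
  cases a <;> cases b <;> cases c <;> cases d <;> cases e0 <;> cases e1 <;> cases e2 <;> cases e3 <;> rfl

-- the whole scan: each flag becomes "some position in [0, n) matched that group"
theorem pv_scan (cond : Nat → Nat → Bool) (n : Nat) (a b c d : Bool) :
    (List.range n).foldl (fun found i =>
        (List.range 4).foldl (fun fd g => if !(fd.getD g false) && cond g i then fd.set g true else fd) found) [a, b, c, d]
      = [a || (List.range n).any (cond 0), b || (List.range n).any (cond 1),
         c || (List.range n).any (cond 2), d || (List.range n).any (cond 3)] := by
  induction n with
  | zero => simp
  | succ n ih =>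
      rw [List.range_succ (n := n), List.foldl_append, ih]
      simp only [List.foldl_cons, List.foldl_nil, pv_step4, List.any_append, List.any_cons,
        List.any_nil, Bool.or_false, Bool.or_assoc]

-- scanning for a prefix at every position is substring search ("w in t"), for nonempty w
theorem pv_any_pos (t w : List Char) (hw : w ≠ []) :
    (List.range t.length).any (fun i => PySem.Chars.startswith (t.drop i) w)
      = PySem.Chars.isIn w t := by
  by_cases h : PySem.Chars.isIn w t = true
  · rw [h, List.any_eq_true]
    obtain ⟨j, hj⟩ := (PySem.Chars.exists_prefix_drop_iff_isIn (sub := w) (s := t)).mpr h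
    have hjlt : j < t.length := by
      by_contra hge
      rw [List.drop_eq_nil_of_le (le_of_not_gt hge)] at hj
      exact hw (List.prefix_nil.mp hj)
    exact ⟨j, List.mem_range.mpr hjlt, (PySem.Chars.startswith_iff _ _).mpr hj⟩
  · rw [Bool.not_eq_true] at h
    rw [h, List.any_eq_false]
    intro i _
    rw [Bool.not_eq_true, ← Bool.not_eq_true, (PySem.Chars.startswith_iff _ _)]
    intro hpre
    exact (Bool.not_eq_true _).mpr h
      ((PySem.Chars.exists_prefix_drop_iff_isIn (sub := w) (s := t)).mp ⟨i, hpre⟩)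

-- Bool `any` distributes over a pointwise `||`
theorem pv_any_or {α : Type} (l : List α) (p q : α → Bool) :
    (l.any fun x => p x || q x) = (l.any p || l.any q) := by
  induction l with
  | nil => rfl
  | cons x xs ih =>
      simp only [List.any_cons, ih]
      cases p x <;> cases q x <;> simp

-- per group: B's scan flag equals A's `any(w in task_lower for w in words)`
theorem pv_group_eq (t : List Char) (ws : List String) (hw : ∀ w ∈ ws, w.toList ≠ []) :
    (List.range t.length).any (fun i => ws.any (fun w => PySem.Chars.startswith (t.drop i) w.toList))
      = ws.any (fun w => PySem.Chars.isIn w.toList t) := by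
  induction ws with
  | nil => simp
  | cons w ws ih =>
      simp only [List.any_cons]
      rw [pv_any_or (List.range t.length) (fun i => PySem.Chars.startswith (t.drop i) w.toList)
            (fun i => ws.any (fun x => PySem.Chars.startswith (t.drop i) x.toList)),
          pv_any_pos t w.toList (hw w (by simp)), ih (fun x hx => hw x (by simp [hx]))]

-- ===== VERDICT (by name: the statement is the Claim_ definition above) =====
theorem analyze_design_needs_py_spec : Claim_equal_analyze_design_needs_py := by
  intro task _
  unfold Spec_analyze_design_needs_py analyze_design_needs_py analyze_design_needs_py_alt
  dsimp only
  set t := (PySem.Str.lower task).toList with ht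
  rw [pv_scan (fun g i => ((pvGroups.getD g ([], "")).1.any (fun w => PySem.Chars.startswith (t.drop i) w.toList)))]
  simp only [Bool.false_or]
  rw [pv_group_eq t (pvGroups.getD 0 ([], "")).1 (by decide),
      pv_group_eq t (pvGroups.getD 1 ([], "")).1 (by decide),
      pv_group_eq t (pvGroups.getD 2 ([], "")).1 (by decide),
      pv_group_eq t (pvGroups.getD 3 ([], "")).1 (by decide)]
  have hIn : ∀ w : String, PySem.Chars.isIn w.toList t = PySem.Str.isIn w (PySem.Str.lower task) := by
    intro w; rw [ht]; simp [PySem.Str.isIn]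
  simp only [pvGroups, List.getD_cons_zero, List.getD_cons_succ, List.any_cons, List.any_nil,
    Bool.or_false, hIn]
  generalize (PySem.Str.isIn "component" (PySem.Str.lower task) || PySem.Str.isIn "system" (PySem.Str.lower task)) = b1
  generalize (PySem.Str.isIn "interface" (PySem.Str.lower task) || (PySem.Str.isIn "screen" (PySem.Str.lower task) || PySem.Str.isIn "page" (PySem.Str.lower task))) = b2
  generalize (PySem.Str.isIn "color" (PySem.Str.lower task) || (PySem.Str.isIn "palette" (PySem.Str.lower task) || PySem.Str.isIn "theme" (PySem.Str.lower task))) = b3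
  generalize (PySem.Str.isIn "typography" (PySem.Str.lower task) || (PySem.Str.isIn "font" (PySem.Str.lower task) || PySem.Str.isIn "text" (PySem.Str.lower task))) = b4
  cases b1 <;> cases b2 <;> cases b3 <;> cases b4 <;> rfl
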